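-- pv_equiv track=rewrite | github.com/elumobility/ocpi-python | scripts/ocpi_parser.py | _split_table_cells
-- ===== SOURCE A (Python) =====
-- def _split_table_cells(row: str) -> list[str]:
--     """Split a table row into cells, handling nested content."""
--     # Remove leading |
--     row = row.lstrip("|")
--
--     # Split by | but be careful with <<...>> references
--     cells = []
--     current = ""
--     depth = 0
--
--     for char in row:
--         if char == "<":
--             depth += 1
--             current += char
--         elif char == ">":
--             depth -= 1
--             current += char
--         elif char == "|" and depth == 0:
--             cells.append(current)
--             current = ""
--         else:
--             current += char
--
--     if current:
--         cells.append(current)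
--
--     return cells
-- ===== SOURCE B (Python) =====
-- def _split_table_cells(row: str) -> list[str]:
--     """Split a table row into cells, handling nested content."""
--     row = row.lstrip("|")
--     # First pass: indices of separators at bracket depth 0.
--     bounds = []
--     depth = 0
--     for i, ch in enumerate(row):
--         if ch == "<":
--             depth += 1
--         elif ch == ">":
--             depth -= 1
--         elif ch == "|" and depth == 0:
--             bounds.append(i)
--     # Second pass: slice the row at those indices.
--     cells = []
--     start = 0
--     for b in bounds:
--         cells.append(row[start:b])
--         start = b + 1
--     last = row[start:]
--     if last:
--         cells.append(last)
--     return cells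
-- ===== Notes on version B (the rewrite author's own statement) =====
-- stated objective: alternative
-- what changed: Replaces the character-accumulation buffer with a two-pass shape: first collect the indices of the top-level (bracket depth zero) separators, then slice the row at those indices, dropping only a trailing empty segment.
import Mathlib
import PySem

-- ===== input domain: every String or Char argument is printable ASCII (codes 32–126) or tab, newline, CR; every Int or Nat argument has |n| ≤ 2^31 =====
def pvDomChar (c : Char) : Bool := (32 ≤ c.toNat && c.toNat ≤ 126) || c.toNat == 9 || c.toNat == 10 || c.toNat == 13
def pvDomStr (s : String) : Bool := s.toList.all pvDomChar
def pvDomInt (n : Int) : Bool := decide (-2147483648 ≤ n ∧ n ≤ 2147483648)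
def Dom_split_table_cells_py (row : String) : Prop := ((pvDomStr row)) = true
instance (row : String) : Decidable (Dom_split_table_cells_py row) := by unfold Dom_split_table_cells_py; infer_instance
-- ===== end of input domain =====

-- B replaces A's accumulation buffer with a collect-separator-indices-then-slice decomposition (same cost).

-- ===== PORT A =====
-- row.lstrip("|") is ported as dropWhile (· = '|') on the char list — exact for a single strip character.
-- the for loop over the characters, with state (cells, current, depth):
def aLoop : List Char → List (List Char) → List Char → Int → List (List Char)
  | [], cells, current, _ => if current ≠ [] then cells ++ [current] else cells
  | c :: cs, cells, current, depth =>
    if c = '<' then aLoop cs cells (current ++ [c]) (depth + 1)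
    else if c = '>' then aLoop cs cells (current ++ [c]) (depth - 1)
    else if c = '|' ∧ depth = 0 then aLoop cs (cells ++ [current]) [] depth
    else aLoop cs cells (current ++ [c]) depth

def split_table_cells_py (row : String) : List String :=
  (aLoop (row.toList.dropWhile (· = '|')) [] [] 0).map String.ofList

-- ===== PORT B =====
-- first pass: indices (into the stripped row) of '|' at depth 0
def bBounds : List Char → Int → Nat → List Nat
  | [], _, _ => []
  | c :: cs, depth, i =>
    if c = '<' then bBounds cs (depth + 1) (i + 1)
    else if c = '>' then bBounds cs (depth - 1) (i + 1)
    else if c = '|' ∧ depth = 0 then i :: bBounds cs depth (i + 1)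
    else bBounds cs depth (i + 1)

-- second pass: the loop over bounds slicing row[start:b], then row[start:] kept if nonempty
def bAssemble (row : List Char) (start : Nat) : List Nat → List (List Char)
  | [] =>
    let last := PySem.List.slice row (some (start : Int)) none
    if last ≠ [] then [last] else []
  | b :: bs =>
    PySem.List.slice row (some (start : Int)) (some (b : Int)) :: bAssemble row (b + 1) bs

def split_table_cells_py_alt (row : String) : List String :=
  let r := row.toList.dropWhile (· = '|')
  (bAssemble r 0 (bBounds r 0 0)).map String.ofList

-- ===== PRECONDITION & SPEC =====
def Spec_split_table_cells_py (row : String) (out : List String) : Prop := out = split_table_cells_py_alt row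
instance (row : String) (out : List String) : Decidable (Spec_split_table_cells_py row out) := by unfold Spec_split_table_cells_py; infer_instance

-- ===== CLAIM (what is proved, stated in full; the proofs are below) =====
def Claim_equal_split_table_cells_py : Prop := ∀ (row : String), Dom_split_table_cells_py row → Spec_split_table_cells_py row (split_table_cells_py row)

-- ===== LEMMAS AND PROOFS =====

-- the loop invariant: scanning cs after a processed prefix 'pre', with current = pre.drop start
theorem key (cs : List Char) : ∀ (pre : List Char) (start : Nat) (d : Int) (cells : List (List Char)),
    start ≤ pre.length →
    aLoop cs cells (pre.drop start) d = cells ++ bAssemble (pre ++ cs) start (bBounds cs d pre.length) := by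
  induction cs with
  | nil =>
    intro pre start d cells h
    simp [aLoop, bBounds, bAssemble, PySem.List.slice_from]
    split <;> simp
  | cons c cs ih =>
    intro pre start d cells h
    by_cases h1 : c = '<'
    · subst h1
      have := ih (pre ++ ['<']) start (d + 1) cells (by simp; omega)
      simp [aLoop, bBounds]
      simpa [List.drop_append_of_le_length h] using this
    · by_cases h2 : c = '>'
      · subst h2
        have := ih (pre ++ ['>']) start (d - 1) cells (by simp; omega)
        simp [aLoop, bBounds, h1]
        simpa [List.drop_append_of_le_length h] using this
      · by_cases h3 : c = '|' ∧ d = 0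
        · obtain ⟨hc, hd⟩ := h3
          subst hc; subst hd
          have hIH := ih (pre ++ ['|']) (pre.length + 1) 0 (cells ++ [pre.drop start]) (by simp)
          have hdrop : (pre ++ ['|']).drop (pre.length + 1) = [] := by simp
          rw [hdrop] at hIH
          simp [aLoop, bBounds, h1, h2]
          rw [hIH]
          have hslice : PySem.List.slice (pre ++ '|' :: cs) (some (start : Int)) (some (pre.length : Int))
              = pre.drop start := by
            rw [PySem.List.slice_toNat _ (Int.natCast_nonneg start) (Int.natCast_nonneg pre.length)]
            simp [List.drop_append_of_le_length h]
          simp [bAssemble, hslice]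
        · have := ih (pre ++ [c]) start d cells (by simp; omega)
          simp [aLoop, bBounds, h1, h2, h3]
          simpa [List.drop_append_of_le_length h] using this

-- ===== VERDICT (by name: the statement is the Claim_ definition above) =====
theorem split_table_cells_py_spec : Claim_equal_split_table_cells_py := by
  intro row _
  unfold Spec_split_table_cells_py split_table_cells_py split_table_cells_py_alt
  have := key (row.toList.dropWhile (· = '|')) [] 0 0 [] (by simp)
  simp at this
  simp [this]
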